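-- pv_equiv track=rewrite | github.com/muhkarakurt1/Advent-of-Code-2023 | Question 11/solution.py | find_expanded_shortest_path_length
-- ===== SOURCE A (Python) =====
-- def find_expanded_shortest_path_length(x_coordinates, y_coordinates, empty_row_idxs, empty_column_idxs, expansion_rate):
--
-- 	shortest_path = 0
--
-- 	# X distance
-- 	if x_coordinates[1] - x_coordinates[0] >= 0:
-- 		big_x, small_x = x_coordinates[1], x_coordinates[0]
-- 	else:
-- 		big_x, small_x = x_coordinates[0], x_coordinates[1]
-- 	number_of_empty_cols_between = len([empty_col_idx for empty_col_idx in empty_column_idxs if small_x < empty_col_idx < big_x])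
-- 	x_distance = abs(x_coordinates[1] - x_coordinates[0]) + number_of_empty_cols_between * (expansion_rate - 1)
-- 	shortest_path += x_distance
--
-- 	# Y distance
-- 	if y_coordinates[1] - y_coordinates[0] >= 0:
-- 		big_y, small_y = y_coordinates[1], y_coordinates[0]
-- 	else:
-- 		big_y, small_y = y_coordinates[0], y_coordinates[1]
-- 	number_of_empty_rows_between = len([empty_row_idx for empty_row_idx in empty_row_idxs if small_y < empty_row_idx < big_y])
-- 	y_distance = abs(y_coordinates[1] - y_coordinates[0]) + number_of_empty_rows_between * (expansion_rate - 1)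
-- 	shortest_path += y_distance
--
-- 	return shortest_path
-- ===== SOURCE B (Python) =====
-- def _bisect_left(a, x):
--     lo, hi = 0, len(a)
--     while lo < hi:
--         mid = (lo + hi) // 2
--         if a[mid] < x:
--             lo = mid + 1
--         else:
--             hi = mid
--     return lo
--
--
-- def _bisect_right(a, x):
--     lo, hi = 0, len(a)
--     while lo < hi:
--         mid = (lo + hi) // 2
--         if a[mid] <= x:
--             lo = mid + 1
--         else:
--             hi = mid
--     return lo
--
--
-- def find_expanded_shortest_path_length(x_coordinates, y_coordinates, empty_row_idxs, empty_column_idxs, expansion_rate):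
--     def leg(p, q, empties):
--         lo, hi = (p, q) if p <= q else (q, p)
--         if lo == hi:
--             return 0
--         s = sorted(empties)
--         between = _bisect_left(s, hi) - _bisect_right(s, lo)
--         return hi - lo + between * (expansion_rate - 1)
--
--     return (leg(x_coordinates[0], x_coordinates[1], empty_column_idxs)
--             + leg(y_coordinates[0], y_coordinates[1], empty_row_idxs))
-- ===== Notes on version B (the rewrite author's own statement) =====
-- stated objective: alternative
-- what changed: Replaced each linear list-comprehension scan counting empty indices strictly between the two coordinates by sorting the index list once and taking bisect_left(hi) - bisect_right(lo) via hand-written binary searches (with a direct 0 for equal coordinates).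
import Mathlib
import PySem

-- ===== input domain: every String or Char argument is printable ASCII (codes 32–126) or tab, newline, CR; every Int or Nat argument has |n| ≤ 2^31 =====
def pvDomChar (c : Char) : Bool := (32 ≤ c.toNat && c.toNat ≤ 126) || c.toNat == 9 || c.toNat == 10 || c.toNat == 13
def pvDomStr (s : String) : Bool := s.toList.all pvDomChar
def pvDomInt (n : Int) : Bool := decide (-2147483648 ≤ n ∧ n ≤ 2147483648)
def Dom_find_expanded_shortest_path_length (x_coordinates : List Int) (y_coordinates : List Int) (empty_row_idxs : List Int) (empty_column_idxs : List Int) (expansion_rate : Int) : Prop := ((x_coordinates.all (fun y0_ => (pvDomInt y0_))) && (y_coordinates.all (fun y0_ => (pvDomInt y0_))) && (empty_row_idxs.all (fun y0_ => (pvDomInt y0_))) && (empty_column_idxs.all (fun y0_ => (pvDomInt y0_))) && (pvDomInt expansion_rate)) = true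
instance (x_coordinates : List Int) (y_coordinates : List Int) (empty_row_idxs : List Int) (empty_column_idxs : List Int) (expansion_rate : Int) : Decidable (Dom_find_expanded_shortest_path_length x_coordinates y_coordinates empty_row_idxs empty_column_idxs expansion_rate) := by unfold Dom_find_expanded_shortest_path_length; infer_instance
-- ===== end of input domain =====

-- B counts the empty indices strictly between the coordinates with two binary searches on a sorted copy instead of A's linear scans; return value only, no mutation.

-- ===== PORT A =====
def find_expanded_shortest_path_length (x_coordinates : List Int) (y_coordinates : List Int) (empty_row_idxs : List Int) (empty_column_idxs : List Int) (expansion_rate : Int) : Int :=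
  -- x_coordinates[0] / [1] raise IndexError when the list is shorter than 2: excluded by Pre_; .getD 0 is never used inside Pre_
  let x0 := (PySem.List.pyGet? x_coordinates 0).getD 0
  let x1 := (PySem.List.pyGet? x_coordinates 1).getD 0
  let bs_x := if x1 - x0 ≥ 0 then (x1, x0) else (x0, x1)
  let number_of_empty_cols_between : Int :=
    ((empty_column_idxs.filter (fun e => decide (bs_x.2 < e ∧ e < bs_x.1))).length : Int)
  let x_distance := |x1 - x0| + number_of_empty_cols_between * (expansion_rate - 1)
  let y0 := (PySem.List.pyGet? y_coordinates 0).getD 0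
  let y1 := (PySem.List.pyGet? y_coordinates 1).getD 0
  let bs_y := if y1 - y0 ≥ 0 then (y1, y0) else (y0, y1)
  let number_of_empty_rows_between : Int :=
    ((empty_row_idxs.filter (fun e => decide (bs_y.2 < e ∧ e < bs_y.1))).length : Int)
  let y_distance := |y1 - y0| + number_of_empty_rows_between * (expansion_rate - 1)
  x_distance + y_distance

-- ===== PORT B =====
-- Source B's `_bisect_left`/`_bisect_right` are the standard-library bisect loops, ported as PySem.List.bisectLeft / bisectRight (the same lo/hi halving loop)
def pvLeg (p q : Int) (empties : List Int) (expansion_rate : Int) : Int :=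
  let lo := if p ≤ q then p else q
  let hi := if p ≤ q then q else p
  if lo = hi then 0
  else
    let s := PySem.List.sorted empties (fun e => e) false
    let between : Int := (PySem.List.bisectLeft s hi : Int) - (PySem.List.bisectRight s lo : Int)
    hi - lo + between * (expansion_rate - 1)

def find_expanded_shortest_path_length_alt (x_coordinates : List Int) (y_coordinates : List Int) (empty_row_idxs : List Int) (empty_column_idxs : List Int) (expansion_rate : Int) : Int :=
  pvLeg ((PySem.List.pyGet? x_coordinates 0).getD 0) ((PySem.List.pyGet? x_coordinates 1).getD 0) empty_column_idxs expansion_rate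
  + pvLeg ((PySem.List.pyGet? y_coordinates 0).getD 0) ((PySem.List.pyGet? y_coordinates 1).getD 0) empty_row_idxs expansion_rate

-- ===== PRECONDITION & SPEC =====
-- A indexes x_coordinates[1] and y_coordinates[1]: it raises IndexError iff either list has fewer than 2 elements; exactly those inputs are excluded.
def Pre_find_expanded_shortest_path_length (x_coordinates : List Int) (y_coordinates : List Int) (empty_row_idxs : List Int) (empty_column_idxs : List Int) (expansion_rate : Int) : Prop :=
  2 ≤ x_coordinates.length ∧ 2 ≤ y_coordinates.length
instance (x_coordinates : List Int) (y_coordinates : List Int) (empty_row_idxs : List Int) (empty_column_idxs : List Int) (expansion_rate : Int) : Decidable (Pre_find_expanded_shortest_path_length x_coordinates y_coordinates empty_row_idxs empty_column_idxs expansion_rate) := by unfold Pre_find_expanded_shortest_path_length; infer_instance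

def pvWitness_find_expanded_shortest_path_length : List Int × List Int × List Int × List Int × Int := ([0, 5], [3, 1], [2], [1, 4], 10)

def Spec_find_expanded_shortest_path_length (x_coordinates : List Int) (y_coordinates : List Int) (empty_row_idxs : List Int) (empty_column_idxs : List Int) (expansion_rate : Int) (out : Int) : Prop := out = find_expanded_shortest_path_length_alt x_coordinates y_coordinates empty_row_idxs empty_column_idxs expansion_rate
instance (x_coordinates : List Int) (y_coordinates : List Int) (empty_row_idxs : List Int) (empty_column_idxs : List Int) (expansion_rate : Int) (out : Int) : Decidable (Spec_find_expanded_shortest_path_length x_coordinates y_coordinates empty_row_idxs empty_column_idxs expansion_rate out) := by unfold Spec_find_expanded_shortest_path_length; infer_instance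

-- ===== CLAIM (what is proved, stated in full; the proofs are below) =====
def Claim_equal_find_expanded_shortest_path_length : Prop := ∀ (x_coordinates : List Int) (y_coordinates : List Int) (empty_row_idxs : List Int) (empty_column_idxs : List Int) (expansion_rate : Int), Dom_find_expanded_shortest_path_length x_coordinates y_coordinates empty_row_idxs empty_column_idxs expansion_rate → Pre_find_expanded_shortest_path_length x_coordinates y_coordinates empty_row_idxs empty_column_idxs expansion_rate → Spec_find_expanded_shortest_path_length x_coordinates y_coordinates empty_row_idxs empty_column_idxs expansion_rate (find_expanded_shortest_path_length x_coordinates y_coordinates empty_row_idxs empty_column_idxs expansion_rate)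

-- ===== LEMMAS AND PROOFS =====

-- a predicate that holds on exactly the first k positions of a list counts k
theorem pv_countP_of_prefix (p : Int → Bool) :
    ∀ (s : List Int) (k : Nat), k ≤ s.length →
    (∀ j (hj : j < s.length), j < k → p s[j]) →
    (∀ j (hj : j < s.length), k ≤ j → ¬ p s[j]) →
    s.countP p = k := by
  intro s
  induction s with
  | nil => intro k hk _ _; simp at hk; simp [hk]
  | cons a t ih =>
    intro k hk h1 h2
    cases k with
    | zero =>
      have ha : ¬ p a := h2 0 (by simp) (by omega)
      have ht := ih 0 (by omega) (by omega)
        (fun j hj _ => by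
          have := h2 (j+1) (by simpa using Nat.succ_lt_succ hj) (by omega)
          simpa using this)
      simp [ha, ht]
    | succ k' =>
      have ha : p a := h1 0 (by simp) (by omega)
      have ht := ih k' (by simpa using hk)
        (fun j hj hjk => by
          have := h1 (j+1) (by simpa using Nat.succ_lt_succ hj) (by omega)
          simpa using this)
        (fun j hj hjk => by
          have := h2 (j+1) (by simpa using Nat.succ_lt_succ hj) (by omega)
          simpa using this)
      simp [ha, ht]

theorem pv_bisectLeft_countP (s : List Int) (x : Int)
    (hs : List.Pairwise (fun a b => a ≤ b) s) :
    PySem.List.bisectLeft s x = s.countP (fun e => decide (e < x)) := by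
  obtain ⟨hle, h1, h2⟩ := PySem.List.bisectLeft_spec s x hs
  exact (pv_countP_of_prefix _ s _ hle
    (fun j hj hjk => by simpa using h1 j hj hjk)
    (fun j hj hjk => by simpa using not_lt.mpr (h2 j hj hjk))).symm

theorem pv_bisectRight_countP (s : List Int) (x : Int)
    (hs : List.Pairwise (fun a b => a ≤ b) s) :
    PySem.List.bisectRight s x = s.countP (fun e => decide (e ≤ x)) := by
  obtain ⟨hle, h1, h2⟩ := PySem.List.bisectRight_spec s x hs
  exact (pv_countP_of_prefix _ s _ hle
    (fun j hj hjk => by simpa using h1 j hj hjk)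
    (fun j hj hjk => by simpa using not_le.mpr (h2 j hj hjk))).symm

-- splitting the count of (· < hi) into (· ≤ lo) and (lo < · < hi) when lo < hi
theorem pv_countP_split (l : List Int) (lo hi : Int) (h : lo < hi) :
    l.countP (fun e => decide (e < hi)) =
      l.countP (fun e => decide (e ≤ lo)) + l.countP (fun e => decide (lo < e ∧ e < hi)) := by
  induction l with
  | nil => simp
  | cons a t ih =>
    simp only [List.countP_cons, ih]
    by_cases h1 : a < hi <;> by_cases h2 : a ≤ lo <;> by_cases h3 : lo < a <;>
      simp [h1, h2, h3] <;> omega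

-- the core of one leg, with the endpoints already ordered
theorem pv_leg_core (lo hi : Int) (l : List Int) (rate : Int) (h : lo ≤ hi) :
    (hi - lo) + ((l.filter (fun e => decide (lo < e ∧ e < hi))).length : Int) * (rate - 1)
      = if lo = hi then 0 else
          (hi - lo) +
            ((PySem.List.bisectLeft (PySem.List.sorted l (fun e => e) false) hi : Int)
              - (PySem.List.bisectRight (PySem.List.sorted l (fun e => e) false) lo : Int))
              * (rate - 1) := by
  by_cases heq : lo = hi
  · subst heq
    have hnil : l.filter (fun e => decide (lo < e ∧ e < lo)) = [] :=
      List.filter_eq_nil_iff.mpr (fun e _ => by simp; omega)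
    rw [if_pos rfl, hnil]
    simp
  · have hlt : lo < hi := lt_of_le_of_ne h heq
    rw [if_neg heq]
    have hperm : (PySem.List.sorted l (fun e => e) false).Perm l :=
      PySem.List.sorted_perm l (fun e => e) false
    have hpw : List.Pairwise (fun a b => a ≤ b) (PySem.List.sorted l (fun e => e) false) := by
      simpa using PySem.List.sorted_pairwise l (fun e => e)
    have hcount : ((l.filter (fun e => decide (lo < e ∧ e < hi))).length : Int)
        = ((PySem.List.bisectLeft (PySem.List.sorted l (fun e => e) false) hi : Int)
            - (PySem.List.bisectRight (PySem.List.sorted l (fun e => e) false) lo : Int)) := by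
      rw [← List.countP_eq_length_filter,
          pv_bisectLeft_countP _ hi hpw, pv_bisectRight_countP _ lo hpw,
          pv_countP_split _ lo hi hlt, ← hperm.countP_eq]
      push_cast
      omega
    rw [hcount]

-- one leg of A equals pvLeg
theorem pv_leg_eq (p q : Int) (l : List Int) (rate : Int) :
    |q - p| + ((l.filter (fun e =>
        decide ((if q - p ≥ 0 then (q, p) else (p, q)).2 < e ∧
                e < (if q - p ≥ 0 then (q, p) else (p, q)).1))).length : Int) * (rate - 1)
      = pvLeg p q l rate := by
  unfold pvLeg
  by_cases h : p ≤ q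
  · have h' : q - p ≥ 0 := by omega
    simp only [if_pos h, if_pos h']
    rw [abs_of_nonneg h']
    exact pv_leg_core p q l rate h
  · have h' : ¬ q - p ≥ 0 := by omega
    simp only [if_neg h', if_neg h]
    rw [abs_of_neg (by omega : q - p < 0), (by ring : -(q - p) = p - q)]
    exact pv_leg_core q p l rate (by omega)

-- ===== VERDICT (by name: the statement is the Claim_ definition above) =====
theorem find_expanded_shortest_path_length_spec : Claim_equal_find_expanded_shortest_path_length := by
  intro xc yc er ec rate _ _
  unfold Spec_find_expanded_shortest_path_length
  unfold find_expanded_shortest_path_length find_expanded_shortest_path_length_alt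
  rw [← pv_leg_eq ((PySem.List.pyGet? xc 0).getD 0) ((PySem.List.pyGet? xc 1).getD 0) ec rate,
      ← pv_leg_eq ((PySem.List.pyGet? yc 0).getD 0) ((PySem.List.pyGet? yc 1).getD 0) er rate]
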